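-- pv_equiv track=rewrite | github.com/deividnf/Structured-Flow-Format | core/exporters/lanes_only_exporter.py | bends_count
-- ===== SOURCE A (Python) =====
-- def bends_count(pts):
--     bends = 0
--     for i in range(1, len(pts)-1):
--         x0,y0 = pts[i-1]
--         x1,y1 = pts[i]
--         x2,y2 = pts[i+1]
--         d1 = (x1-x0, y1-y0)
--         d2 = (x2-x1, y2-y1)
--         if (d1[0] == 0) != (d2[0] == 0):
--             bends += 1
--     return bends
-- ===== SOURCE B (Python) =====
-- def bends_count(pts):
--     # Run-length view: a bend happens exactly where one maximal run of
--     # equally-oriented segments (vertical vs non-vertical) ends and the next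
--     # begins, so the answer is (number of maximal runs) - 1.
--     if len(pts) < 3:
--         return 0
--     flags = [x0 == x1 for (x0, y0), (x1, y1) in zip(pts, pts[1:])]
--     return _runs(flags) - 1
--
-- def _runs(flags):
--     # number of maximal runs of equal values, stripping one whole run per call
--     if not flags:
--         return 0
--     head = flags[0]
--     i = 1
--     while i < len(flags) and flags[i] == head:
--         i += 1
--     return 1 + _runs(flags[i:])
-- ===== Notes on version B (the rewrite author's own statement) =====
-- stated objective: alternative
-- what changed: Recasts bend counting as run-length decomposition: build per-segment verticality flags, then recursively strip one maximal run of equal flags at a time and return (number of runs) - 1, instead of A's indexed triple-window scan that increments on each direction change.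
import Mathlib
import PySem

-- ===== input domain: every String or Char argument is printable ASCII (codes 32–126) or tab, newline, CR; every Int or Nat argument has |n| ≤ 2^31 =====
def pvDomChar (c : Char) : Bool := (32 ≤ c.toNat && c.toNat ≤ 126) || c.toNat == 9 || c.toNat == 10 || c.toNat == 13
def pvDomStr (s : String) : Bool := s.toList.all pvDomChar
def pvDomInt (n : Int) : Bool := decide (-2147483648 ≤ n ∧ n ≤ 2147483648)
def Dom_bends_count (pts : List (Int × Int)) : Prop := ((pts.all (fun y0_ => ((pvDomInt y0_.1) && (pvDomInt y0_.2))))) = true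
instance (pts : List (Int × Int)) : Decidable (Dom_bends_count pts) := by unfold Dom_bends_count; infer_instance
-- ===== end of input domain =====

-- B recasts bend counting as run-length decomposition (strip one maximal run of equal
-- verticality flags per recursive call, return runs - 1) instead of A's indexed
-- triple-window scan; alternative algorithm, same cost.


-- ===== PORT A =====
-- literal port: loop i over range(1, len(pts)-1), indexing pts[i-1], pts[i], pts[i+1]
-- (always in range there, so pyGetD with an arbitrary default is exact)
def bends_count (pts : List (Int × Int)) : Int :=
  (PySem.List.pyRange 1 ((pts.length : Int) - 1)).foldl
    (fun bends i =>
      let p0 := PySem.List.pyGetD pts (i - 1) (0, 0)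
      let p1 := PySem.List.pyGetD pts i (0, 0)
      let p2 := PySem.List.pyGetD pts (i + 1) (0, 0)
      let d1 := (p1.1 - p0.1, p1.2 - p0.2)
      let d2 := (p2.1 - p1.1, p2.2 - p1.2)
      if ((d1.1 == 0) != (d2.1 == 0)) then bends + 1 else bends) 0

-- ===== PORT B =====
-- port of Source B's _runs: strips one maximal run per call (the while loop that finds the
-- first index with a different flag and recurses on flags[i:] is exactly
-- dropWhile (· == head) on the tail)
def bRuns : List Bool → Int
  | [] => 0
  | h :: t => 1 + bRuns (t.dropWhile (· == h))
termination_by l => l.length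
decreasing_by
  exact Nat.lt_succ_of_le (List.length_dropWhile_le (· == h) t)


-- literal port of Source B: guard, flag-building pass, then runs - 1
def bends_count_alt (pts : List (Int × Int)) : Int :=
  if pts.length < 3 then 0
  else
    let flags := (pts.zip pts.tail).map (fun pq => pq.1.1 == pq.2.1)
    bRuns flags - 1

-- ===== PRECONDITION & SPEC =====
def Spec_bends_count (pts : List (Int × Int)) (out : Int) : Prop := out = bends_count_alt pts
instance (pts : List (Int × Int)) (out : Int) : Decidable (Spec_bends_count pts out) := by unfold Spec_bends_count; infer_instance

-- ===== CLAIM (what is proved, stated in full; the proofs are below) =====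
def Claim_equal_bends_count : Prop := ∀ (pts : List (Int × Int)), Dom_bends_count pts → Spec_bends_count pts (bends_count pts)

-- ===== LEMMAS AND PROOFS =====

-- structural specification both ports are reduced to
def bendsRec : List (Int × Int) → Int
  | p0 :: p1 :: p2 :: rest =>
      (if ((p1.1 - p0.1 == 0) != (p2.1 - p1.1 == 0)) then 1 else 0) + bendsRec (p1 :: p2 :: rest)
  | _ => 0

-- adjacent-transition count over a flag list
def transB : List Bool → Int
  | a :: b :: t => (if (a != b) then 1 else 0) + transB (b :: t)
  | _ => 0

-- A's loop after the pyRange/pyGetD layer is shifted to Nat indices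
theorem natcount_eq_bendsRec (pts : List (Int × Int)) :
    ((List.range (pts.length - 2)).countP
      (fun k => ((pts.getD (k+1) (0,0)).1 - (pts.getD k (0,0)).1 == 0)
                != ((pts.getD (k+2) (0,0)).1 - (pts.getD (k+1) (0,0)).1 == 0)) : Int)
    = bendsRec pts := by
  induction pts with
  | nil => simp [bendsRec]
  | cons p0 tl ih =>
    match tl with
    | [] => simp [bendsRec]
    | [p1] => simp [bendsRec]
    | p1 :: p2 :: rest =>
      have hlen : (p0 :: p1 :: p2 :: rest).length - 2 = ((p1 :: p2 :: rest).length - 2) + 1 := by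
        simp
      rw [hlen, List.range_succ_eq_map, List.countP_cons, List.countP_map]
      simp only [List.getD_cons_zero, List.getD_cons_succ] at *
      rw [show bendsRec (p0 :: p1 :: p2 :: rest)
            = (if ((p1.1 - p0.1 == 0) != (p2.1 - p1.1 == 0)) then 1 else 0)
              + bendsRec (p1 :: p2 :: rest) from rfl]
      rw [← ih]
      simp only [Function.comp_def, List.getD_cons_succ]
      push_cast
      ring

theorem bends_count_eq_bendsRec (pts : List (Int × Int)) : bends_count pts = bendsRec pts := by
  unfold bends_count
  rw [PySem.List.foldl_count_if
        (fun i => ((PySem.List.pyGetD pts i ((0:Int),(0:Int))).1 - (PySem.List.pyGetD pts (i-1) (0,0)).1 == 0)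
                  != ((PySem.List.pyGetD pts (i+1) (0,0)).1 - (PySem.List.pyGetD pts i (0,0)).1 == 0))]
  rw [PySem.List.pyRange_one, List.countP_map]
  have harg : ((pts.length : Int) - 1 - 1).toNat = pts.length - 2 := by omega
  rw [harg, ← natcount_eq_bendsRec, zero_add, Nat.cast_inj]
  apply List.countP_congr
  intro k _
  have e1 : (1 : Int) + (k : Int) - 1 = ((k : Nat) : Int) := by omega
  have e2 : (1 : Int) + (k : Int) = (((k+1) : Nat) : Int) := by omega
  have e3 : (1 : Int) + (k : Int) + 1 = (((k+2) : Nat) : Int) := by omega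
  rw [Function.comp_apply, e1, e3, e2]
  simp only [PySem.List.pyGetD_natCast]

theorem beq_sub_zero (a b : Int) : ((a - b) == 0) = (b == a) := by
  by_cases h : b = a
  · simp [h]
  · simp [h, sub_eq_zero, fun x => (Ne.symm h : a ≠ b) x]

theorem bRuns_cons (h : Bool) (t : List Bool) :
    bRuns (h :: t) = 1 + bRuns (t.dropWhile (· == h)) := by
  rw [bRuns]

-- number of runs = transitions + 1 on a nonempty flag list
theorem bRuns_eq_trans (t : List Bool) : ∀ h, bRuns (h :: t) = 1 + transB (h :: t) := by
  induction t with
  | nil => intro h; rw [bRuns_cons]; simp [transB, bRuns]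
  | cons b t' ih =>
    intro h
    by_cases hb : b = h
    · subst hb
      rw [bRuns_cons]
      rw [show (b :: t').dropWhile (· == b) = t'.dropWhile (· == b) by simp [List.dropWhile]]
      rw [show transB (b :: b :: t') = (if (b != b) then 1 else 0) + transB (b :: t') from rfl]
      have := ih b
      rw [bRuns_cons] at this
      simp only [bne_self_eq_false, if_neg Bool.false_ne_true, zero_add] at *
      omega
    · rw [bRuns_cons]
      rw [show (b :: t').dropWhile (· == h) = b :: t' by
            simp [hb]]
      rw [ih b]
      rw [show transB (h :: b :: t') = (if (h != b) then 1 else 0) + transB (b :: t') from rfl]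
      have hne : (h != b) = true := by
        simp only [bne_iff_ne, ne_eq]
        exact fun e => hb e.symm
      rw [hne]
      norm_num

-- the transition count over the flag list is the triple-window spec
theorem trans_flags_eq_bendsRec (pts : List (Int × Int)) :
    transB ((pts.zip pts.tail).map (fun pq => pq.1.1 == pq.2.1)) = bendsRec pts := by
  induction pts with
  | nil => simp [transB, bendsRec]
  | cons p0 tl ih =>
    match tl with
    | [] => simp [transB, bendsRec]
    | [p1] => simp [transB, bendsRec]
    | p1 :: p2 :: rest =>
      simp only [List.tail_cons, List.zip_cons_cons, List.map_cons] at *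
      rw [show transB ((p0.1 == p1.1) :: (p1.1 == p2.1) :: ((p2 :: rest).zip rest).map (fun pq => pq.1.1 == pq.2.1))
            = (if ((p0.1 == p1.1) != (p1.1 == p2.1)) then 1 else 0)
              + transB ((p1.1 == p2.1) :: ((p2 :: rest).zip rest).map (fun pq => pq.1.1 == pq.2.1)) from rfl]
      rw [ih]
      rw [show bendsRec (p0 :: p1 :: p2 :: rest)
            = (if ((p1.1 - p0.1 == 0) != (p2.1 - p1.1 == 0)) then 1 else 0)
              + bendsRec (p1 :: p2 :: rest) from rfl]
      rw [beq_sub_zero, beq_sub_zero]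

theorem alt_eq_bendsRec (pts : List (Int × Int)) : bends_count_alt pts = bendsRec pts := by
  unfold bends_count_alt
  by_cases h : pts.length < 3
  · rw [if_pos h]
    match pts, h with
    | [], _ => rfl
    | [_], _ => rfl
    | [_, _], _ => rfl
  · rw [if_neg h]
    match pts with
    | [] => exact absurd (by simp) h
    | [_] => exact absurd (by simp) h
    | [_, _] => exact absurd (by simp) h
    | p0 :: p1 :: p2 :: rest =>
      rw [← trans_flags_eq_bendsRec]
      simp only [List.tail_cons, List.zip_cons_cons, List.map_cons]
      rw [bRuns_eq_trans]
      ring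

-- ===== VERDICT (by name: the statement is the Claim_ definition above) =====
theorem bends_count_spec : Claim_equal_bends_count := by
  intro pts _
  unfold Spec_bends_count
  rw [bends_count_eq_bendsRec, alt_eq_bendsRec]
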